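-- pv_equiv track=rewrite | github.com/linke131/btcloud | data/plugins/folder/ossfs-1.5/ossfs/ossfs_main.py | _parse_init_script
-- ===== SOURCE A (Python) =====
-- def _parse_init_script(text):
--     s0 = False
--     cmds = []
--     lines = text.split('\n')
--     for line in lines:
--         line = line.strip()
--         if not line: continue
--         # 兼容旧配置
--         if line.split(' ')[0] in ['bosfs', 'cosfs', 's3fs']:
--             cmds.append(line)
--             continue
--         if line == '#MOUNT#': s0 = True
--         if line[0] == '#' or not s0: continue
--         cmds.append(line)
--     return cmds
-- ===== SOURCE B (Python) =====
-- def _parse_init_script(text):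
--     lines = [l.strip() for l in text.split('\n')]
--     mount = next((i for i, l in enumerate(lines) if l == '#MOUNT#'), None)
--     before = lines if mount is None else lines[:mount]
--     after = [] if mount is None else lines[mount + 1:]
--     cmds = [l for l in before if l and l.split(' ')[0] in ('bosfs', 'cosfs', 's3fs')]
--     cmds += [l for l in after if l and l[0] != '#']
--     return cmds
-- ===== Notes on version B (the rewrite author's own statement) =====
-- stated objective: simpler
-- what changed: Replaces A's single loop carrying a mutable s0 flag with a stateless decomposition: find the index of the first mount-marker line, then filter fs-command lines before it and non-comment lines after it in two separate passes.
import Mathlib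
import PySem

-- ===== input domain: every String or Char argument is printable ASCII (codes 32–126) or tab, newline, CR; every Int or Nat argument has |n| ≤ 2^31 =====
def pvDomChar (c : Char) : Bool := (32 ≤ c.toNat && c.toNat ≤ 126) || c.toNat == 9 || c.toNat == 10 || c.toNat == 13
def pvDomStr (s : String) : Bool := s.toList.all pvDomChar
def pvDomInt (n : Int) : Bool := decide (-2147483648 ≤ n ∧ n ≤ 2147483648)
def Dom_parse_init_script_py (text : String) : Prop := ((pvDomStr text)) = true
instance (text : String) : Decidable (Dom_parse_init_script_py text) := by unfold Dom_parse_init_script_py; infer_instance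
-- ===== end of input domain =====

-- B rewrites A's single stateful loop as: locate the first '#MOUNT#' line, then two stateless
-- filter passes (fs-command lines before it, non-comment lines after it); objective: simpler.

-- shared primitive: Python's s.split(sep) for a nonempty literal sep (exact: PySem.Chars.splitOn)
def pySplit (s sep : String) : List String :=
  (PySem.Chars.splitOn s.toList sep.toList).map String.ofList

-- ===== PORT A =====
def parse_init_script_py (text : String) : List String :=
  ((pySplit text "\n").foldl
    (fun (st : Bool × List String) line0 =>
      let line := PySem.Str.strip line0
      if line = "" then st
      else if PySem.List.pyGetD (pySplit line " ") 0 "" ∈ (["bosfs", "cosfs", "s3fs"] : List String) then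
        (st.1, st.2 ++ [line])
      else
        let s0 := if line = "#MOUNT#" then true else st.1
        if PySem.Str.pyGet? line 0 = some '#' ∨ s0 = false then (s0, st.2)
        else (s0, st.2 ++ [line]))
    (false, [])).2

-- ===== PORT B =====
def parse_init_script_py_alt (text : String) : List String :=
  let lines := (pySplit text "\n").map PySem.Str.strip
  let mount := lines.findIdx? (· == "#MOUNT#")
  let before := match mount with | none => lines | some i => lines.take i
  let after := match mount with | none => [] | some i => lines.drop (i + 1)
  before.filter (fun l => !(l == "") && decide (PySem.List.pyGetD (pySplit l " ") 0 "" ∈ (["bosfs", "cosfs", "s3fs"] : List String)))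
    ++ after.filter (fun l => !(l == "") && !(PySem.Str.pyGet? l 0 == some '#'))

-- ===== PRECONDITION & SPEC =====
def Spec_parse_init_script_py (text : String) (out : List String) : Prop := out = parse_init_script_py_alt text
instance (text : String) (out : List String) : Decidable (Spec_parse_init_script_py text out) := by unfold Spec_parse_init_script_py; infer_instance

-- ===== CLAIM (what is proved, stated in full; the proofs are below) =====
def Claim_equal_parse_init_script_py : Prop := ∀ (text : String), Dom_parse_init_script_py text → Spec_parse_init_script_py text (parse_init_script_py text)

-- ===== LEMMAS AND PROOFS =====

-- A's loop body, on an already-stripped line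
def stepA (st : Bool × List String) (line : String) : Bool × List String :=
  if line = "" then st
  else if PySem.List.pyGetD (pySplit line " ") 0 "" ∈ (["bosfs", "cosfs", "s3fs"] : List String) then
    (st.1, st.2 ++ [line])
  else
    let s0 := if line = "#MOUNT#" then true else st.1
    if PySem.Str.pyGet? line 0 = some '#' ∨ s0 = false then (s0, st.2)
    else (s0, st.2 ++ [line])

theorem parse_A_eq_fold (text : String) :
    parse_init_script_py text =
      (((pySplit text "\n").map PySem.Str.strip).foldl stepA (false, [])).2 := by
  rw [List.foldl_map]; rfl

-- first chunk of splitOn starts with cur.reverse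
theorem go_shape (sep : List Char) (fuel : Nat) :
    ∀ (l cur : List Char) (acc : List (List Char)), ∃ t rest,
      PySem.Chars.splitOn.go sep fuel l cur acc = acc.reverse ++ (cur.reverse ++ t) :: rest := by
  induction fuel with
  | zero =>
      intro l cur acc
      exact ⟨l, [], by simp [PySem.Chars.splitOn.go]⟩
  | succ fuel ih =>
      intro l cur acc
      cases l with
      | nil => exact ⟨[], [], by simp [PySem.Chars.splitOn.go]⟩
      | cons c rest =>
          by_cases h : sep.isPrefixOf (c :: rest) = true
          · obtain ⟨t, r, hr⟩ := ih (List.drop sep.length (c :: rest)) [] (cur.reverse :: acc)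
            refine ⟨[], (t :: r), ?_⟩
            simp [PySem.Chars.splitOn.go, h, hr]
          · obtain ⟨t, r, hr⟩ := ih rest (c :: cur) acc
            refine ⟨c :: t, r, ?_⟩
            simp only [PySem.Chars.splitOn.go, h, Bool.false_eq_true, ite_false, hr]
            simp

-- a line whose first space-token is an fs command does not start with '#'
theorem fs_not_hash (l : String)
    (h : PySem.List.pyGetD (pySplit l " ") 0 "" ∈ (["bosfs", "cosfs", "s3fs"] : List String)) :
    (PySem.Str.pyGet? l 0 == some '#') = false := by
  rw [show (0 : Int) = ((0 : Nat) : Int) from rfl, PySem.Str.pyGet?_natCast]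
  cases cl : l.toList with
  | nil => simp
  | cons c cs =>
      by_cases hc : c = '#'
      · exfalso
        subst hc
        unfold pySplit at h
        rw [cl] at h
        have hpre : (List.isPrefixOf (" ".toList) ('#' :: cs)) = false := by
          have hsp : " ".toList = [' '] := by decide
          rw [hsp]
          simp [List.isPrefixOf]
        obtain ⟨t, rest, hr⟩ := go_shape (" ".toList) (cs.length + 1) cs ['#'] []
        have hsplit : PySem.Chars.splitOn ('#' :: cs) (" ".toList) = ('#' :: t) :: rest := by
          rw [PySem.Chars.splitOn]
          simp only [List.length_cons]
          rw [show PySem.Chars.splitOn.go " ".toList (cs.length + 1 + 1) ('#' :: cs) [] [] =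
              if (" ".toList).isPrefixOf ('#' :: cs) = true then
                PySem.Chars.splitOn.go " ".toList (cs.length + 1) (List.drop (" ".toList).length ('#' :: cs)) [] ([].reverse :: [])
              else PySem.Chars.splitOn.go " ".toList (cs.length + 1) cs ('#' :: []) [] from rfl]
          rw [hpre]
          have hsp : " ".toList = [' '] := by decide
          rw [hsp] at hr
          simpa using hr
        rw [hsplit] at h
        have hhead : PySem.List.pyGetD (List.map String.ofList (('#' :: t) :: rest)) 0 "" =
            String.ofList ('#' :: t) := by
          simp [PySem.List.pyGetD, PySem.List.pyGet?, PySem.List.pyIdx?]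
        rw [hhead] at h
        simp only [List.mem_cons, List.not_mem_nil, or_false] at h
        rcases h with h | h | h <;>
          · have := congrArg String.toList h
            simp at this
      · simp [hc]

-- folding A's step with s0 already true appends exactly the non-empty non-'#' lines
theorem after_fold (S : List String) : ∀ cmds : List String,
    S.foldl stepA (true, cmds) =
      (true, cmds ++ S.filter (fun l => !(l == "") && !(PySem.Str.pyGet? l 0 == some '#'))) := by
  induction S with
  | nil => intro cmds; simp
  | cons l S ih =>
      intro cmds
      rw [List.foldl_cons]
      by_cases h0 : l = ""
      · rw [show stepA (true, cmds) l = (true, cmds) from by simp [stepA, h0], ih,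
          List.filter_cons_of_neg (by simp [h0])]
      · by_cases hh : PySem.List.pyGet? l.toList 0 = some '#'
        · have hfs : PySem.List.pyGetD (pySplit l " ") 0 "" ∉ (["bosfs", "cosfs", "s3fs"] : List String) := by
            intro hf
            have := fs_not_hash l hf
            simp [hh] at this
          rw [show stepA (true, cmds) l = (true, cmds) from by simp [stepA, h0, hfs, hh, ite_self], ih,
            List.filter_cons_of_neg (by simp [hh])]
        · have hstep : stepA (true, cmds) l = (true, cmds ++ [l]) := by
            by_cases hfs : PySem.List.pyGetD (pySplit l " ") 0 "" ∈ (["bosfs", "cosfs", "s3fs"] : List String)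
            · simp [stepA, h0, hfs]
            · simp [stepA, h0, hfs, hh, ite_self]
          rw [hstep, ih, List.filter_cons_of_pos (by simp [h0, hh])]
          simp

-- folding A's step with s0 false over lines free of '#MOUNT#' appends exactly the fs-command lines
theorem before_fold (S : List String) (hS : ∀ l ∈ S, l ≠ "#MOUNT#") : ∀ cmds : List String,
    S.foldl stepA (false, cmds) =
      (false, cmds ++ S.filter (fun l => !(l == "") && decide (PySem.List.pyGetD (pySplit l " ") 0 "" ∈ (["bosfs", "cosfs", "s3fs"] : List String)))) := by
  induction S with
  | nil => intro cmds; simp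
  | cons l S ih =>
      intro cmds
      have hl : l ≠ "#MOUNT#" := hS l (List.mem_cons_self ..)
      have hS' : ∀ l ∈ S, l ≠ "#MOUNT#" := fun x hx => hS x (List.mem_cons_of_mem _ hx)
      rw [List.foldl_cons]
      by_cases h0 : l = ""
      · rw [show stepA (false, cmds) l = (false, cmds) from by simp [stepA, h0], ih hS',
          List.filter_cons_of_neg (by simp [h0])]
      · by_cases hfs : PySem.List.pyGetD (pySplit l " ") 0 "" ∈ (["bosfs", "cosfs", "s3fs"] : List String)
        · rw [show stepA (false, cmds) l = (false, cmds ++ [l]) from by simp [stepA, h0, hfs], ih hS',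
            List.filter_cons_of_pos (by simp [h0, hfs])]
          simp
        · rw [show stepA (false, cmds) l = (false, cmds) from by simp [stepA, h0, hfs, hl], ih hS',
            List.filter_cons_of_neg (by simp [hfs])]

theorem mount_step (cmds : List String) :
    stepA (false, cmds) "#MOUNT#" = (true, cmds) := by
  have h1 : PySem.List.pyGetD (pySplit "#MOUNT#" " ") 0 "" ∉ (["bosfs", "cosfs", "s3fs"] : List String) := by decide
  simp [stepA, h1]

-- ===== VERDICT (by name: the statement is the Claim_ definition above) =====
theorem parse_init_script_py_spec : Claim_equal_parse_init_script_py := by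
  intro text _
  unfold Spec_parse_init_script_py parse_init_script_py_alt
  rw [parse_A_eq_fold]
  set S := (pySplit text "\n").map PySem.Str.strip with hSdef
  cases hfind : S.findIdx? (· == "#MOUNT#") with
  | none =>
      have hno : ∀ l ∈ S, l ≠ "#MOUNT#" := by
        intro l hl
        have := List.findIdx?_eq_none_iff.mp hfind l hl
        simpa using this
      simp only [hfind]
      rw [before_fold S hno []]
      simp
  | some i =>
      obtain ⟨hi, hpi, hlt⟩ := List.findIdx?_eq_some_iff_getElem.mp hfind
      have hSi : S[i] = "#MOUNT#" := by simpa using hpi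
      have hsplitS : S = S.take i ++ "#MOUNT#" :: S.drop (i + 1) := by
        conv_lhs => rw [← List.take_append_drop i S]
        rw [List.drop_eq_getElem_cons hi, hSi]
      have hno : ∀ l ∈ S.take i, l ≠ "#MOUNT#" := by
        intro l hl
        obtain ⟨j, hj, hgj⟩ := List.getElem_of_mem hl
        have hji : j < i := lt_of_lt_of_le hj (List.length_take_le i S)
        have : l = S[j] := by
          rw [← hgj, List.getElem_take]
        subst this
        have := hlt j hji
        simpa using this
      simp only [hfind]
      conv_lhs => rw [hsplitS]
      rw [List.foldl_append, before_fold (S.take i) hno [], List.foldl_cons, mount_step,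
        after_fold]
      simp
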